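-- pv_equiv track=rewrite | github.com/Vlado-Iliev/SoftUni-Courses | lists/10.1.py | second_chance
-- ===== SOURCE A (Python) =====
-- def second_chance(data):
--     current_max_num = 0
--     special = ''
--     for ch in data:
--         if current_max_num >= 6:
--             break
--         if ch != special:
--             special = ch
--             current_max_num = 1
--         else:
--             current_max_num += 1
--
--     return special, current_max_num
-- ===== SOURCE B (Python) =====
-- def second_chance(data):
--     special, current_max_num = '', 0
--     i, n = 0, len(data)
--     while i < n:
--         ch = data[i]
--         j = i + 1
--         while j < n and data[j] == ch:
--             j += 1
--         special, current_max_num = ch, min(j - i, 6)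
--         if j - i >= 6:
--             break
--         i = j
--     return special, current_max_num
-- ===== Notes on version B (the rewrite author's own statement) =====
-- stated objective: alternative
-- what changed: B iterates over maximal runs of equal characters (scan the run length, then jump past it) instead of A's per-character counter with reset-on-change, breaking on the first run of length >= 6 and capping the stored count with min(len, 6).
import Mathlib
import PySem

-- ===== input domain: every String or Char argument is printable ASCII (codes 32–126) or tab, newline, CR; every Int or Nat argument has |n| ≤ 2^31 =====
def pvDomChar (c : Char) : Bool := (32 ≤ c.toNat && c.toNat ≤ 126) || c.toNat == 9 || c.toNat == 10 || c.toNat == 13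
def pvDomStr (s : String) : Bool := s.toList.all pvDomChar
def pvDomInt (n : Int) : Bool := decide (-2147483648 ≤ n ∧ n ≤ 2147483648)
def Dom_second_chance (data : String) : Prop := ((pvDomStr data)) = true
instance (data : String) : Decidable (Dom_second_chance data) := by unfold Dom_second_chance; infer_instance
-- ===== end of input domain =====

-- B replaces A's per-character counter (reset on change, break at 6) by a run-based scan:
-- find each maximal run of equal characters, record (char, min(len,6)), break on the first
-- run of length >= 6; objective: alternative decomposition, same cost.


-- ===== PORT A =====
-- A's for-loop: state (special, current_max_num); break once the counter reaches 6.
def secondChanceLoopA : List Char → String → Int → String × Int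
  | [], s, cnt => (s, cnt)
  | ch :: rest, s, cnt =>
    if cnt ≥ 6 then (s, cnt)
    else if String.ofList [ch] ≠ s then secondChanceLoopA rest (String.ofList [ch]) 1
    else secondChanceLoopA rest s (cnt + 1)

def second_chance (data : String) : String × Int :=
  secondChanceLoopA data.toList "" 0

-- ===== PORT B =====
-- inner while loop of Source B: number of further chars equal to ch at the front of the rest
def runLen (ch : Char) : List Char → Nat
  | [] => 0
  | d :: rest => if d == ch then 1 + runLen ch rest else 0

lemma runLen_le (ch : Char) : ∀ l : List Char, runLen ch l ≤ l.length
  | [] => Nat.le_refl _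
  | d :: rest => by
    simp only [runLen, List.length_cons]
    split
    · have := runLen_le ch rest; omega
    · omega

-- outer while loop of Source B: per maximal run, set the pair and break if the run reaches 6
def secondChanceLoopB : List Char → String × Int → String × Int
  | [], st => st
  | ch :: rest, _ =>
    let k : Int := (runLen ch rest : Int) + 1
    let st' := (String.ofList [ch], min k 6)
    if k ≥ 6 then st' else secondChanceLoopB (rest.drop (runLen ch rest)) st'
  termination_by l => l.length
  decreasing_by
    simp only [List.length_drop, List.length_cons]
    have := runLen_le ch rest
    omega

def second_chance_alt (data : String) : String × Int :=
  secondChanceLoopB data.toList ("", 0)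

-- ===== PRECONDITION & SPEC =====
def Spec_second_chance (data : String) (out : String × Int) : Prop := out = second_chance_alt data
instance (data : String) (out : String × Int) : Decidable (Spec_second_chance data out) := by unfold Spec_second_chance; infer_instance

-- ===== CLAIM (what is proved, stated in full; the proofs are below) =====
def Claim_equal_second_chance : Prop := ∀ (data : String), Dom_second_chance data → Spec_second_chance data (second_chance data)

-- ===== LEMMAS AND PROOFS =====

lemma loopB_nil (st : String × Int) : secondChanceLoopB [] st = st := by
  unfold secondChanceLoopB
  rfl

lemma loopB_cons (ch : Char) (rest : List Char) (st : String × Int) :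
    secondChanceLoopB (ch :: rest) st =
      (if ((runLen ch rest : Int) + 1) ≥ 6
       then (String.ofList [ch], min ((runLen ch rest : Int) + 1) 6)
       else secondChanceLoopB (rest.drop (runLen ch rest))
              (String.ofList [ch], min ((runLen ch rest : Int) + 1) 6)) := by
  conv_lhs => rw [secondChanceLoopB.eq_def]

lemma ofList_singleton_inj {a b : Char} (h : String.ofList [a] = String.ofList [b]) : a = b := by
  have := congrArg String.toList h
  simpa using this

-- A's loop returns immediately once the counter is ≥ 6
lemma loopA_done (l : List Char) (s : String) (cnt : Int) (h : 6 ≤ cnt) :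
    secondChanceLoopA l s cnt = (s, cnt) := by
  cases l with
  | nil => rfl
  | cons ch rest => simp [secondChanceLoopA, show cnt ≥ 6 from h]

-- A's loop across one (partial) run: it either hits 6 inside the run or consumes it whole
lemma loopA_run : ∀ (l : List Char) (c : Char) (cnt : Int), 1 ≤ cnt → cnt < 6 →
    secondChanceLoopA l (String.ofList [c]) cnt =
      if 6 ≤ cnt + (runLen c l : Int) then (String.ofList [c], 6)
      else secondChanceLoopA (l.drop (runLen c l)) (String.ofList [c]) (cnt + (runLen c l : Int))
  | [], c, cnt, _, h6 => by
    simp [runLen, show ¬ (6 ≤ cnt) by omega]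
  | d :: rest, c, cnt, h1, h6 => by
    by_cases hdc : d = c
    · subst hdc
      have hrl : runLen d (d :: rest) = 1 + runLen d rest := by simp [runLen]
      have hstep : secondChanceLoopA (d :: rest) (String.ofList [d]) cnt
          = secondChanceLoopA rest (String.ofList [d]) (cnt + 1) := by
        simp [secondChanceLoopA, show ¬ (cnt ≥ 6) by omega]
      rw [hstep, hrl]
      rw [show (1 + runLen d rest) = runLen d rest + 1 from Nat.add_comm _ _]
      by_cases h7 : cnt + 1 < 6
      · rw [loopA_run rest d (cnt + 1) (by omega) h7]
        have harith : cnt + 1 + (runLen d rest : Int) = cnt + ((runLen d rest + 1 : Nat) : Int) := by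
          push_cast; ring
        rw [harith, List.drop_succ_cons]
      · have hc : cnt = 5 := by omega
        rw [loopA_done rest _ (cnt + 1) (by omega)]
        have hpos : 6 ≤ cnt + ((runLen d rest + 1 : Nat) : Int) := by push_cast; omega
        rw [if_pos hpos]
        norm_num [hc]
    · have hrl : runLen c (d :: rest) = 0 := by simp [runLen, hdc]
      rw [hrl]
      have h0 : ¬ (6 ≤ cnt + ((0 : Nat) : Int)) := by push_cast; omega
      rw [if_neg h0]
      norm_num

lemma drop_runLen (c : Char) : ∀ l : List Char, l.drop (runLen c l) = l.dropWhile (· == c)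
  | [] => rfl
  | x :: xs => by
    by_cases hxc : x = c
    · subst hxc
      have h1 : runLen x (x :: xs) = runLen x xs + 1 := by simp [runLen, Nat.add_comm]
      rw [h1, List.drop_succ_cons, drop_runLen x xs,
        List.dropWhile_cons_of_pos (by simp)]
    · rw [show runLen c (x :: xs) = 0 by simp [runLen, hxc],
        List.dropWhile_cons_of_neg (by simp [hxc])]
      rfl

lemma dropWhile_head_not (p : Char → Bool) :
    ∀ (l : List Char) (d : Char) (t : List Char), l.dropWhile p = d :: t → p d = false
  | [], d, t, h => by simp at h
  | x :: xs, d, t, h => by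
    by_cases hx : p x = true
    · rw [List.dropWhile_cons_of_pos hx] at h
      exact dropWhile_head_not p xs d t h
    · rw [List.dropWhile_cons_of_neg hx] at h
      cases h
      simpa using hx

-- Main invariant: starting at a run boundary (counter < 6, special differs from the next
-- character), A's per-character loop equals B's run-jumping loop.
lemma loopAB : ∀ (n : Nat) (l : List Char), l.length ≤ n → ∀ (s : String) (cnt : Int),
    cnt < 6 → (∀ c rest, l = c :: rest → s ≠ String.ofList [c]) →
    secondChanceLoopA l s cnt = secondChanceLoopB l (s, cnt)
  | _, [], _, s, cnt, _, _ => by simp [secondChanceLoopA, loopB_nil]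
  | Nat.zero, c :: rest, hlen, _, _, _, _ => by simp at hlen
  | Nat.succ n, c :: rest, hlen, s, cnt, h6, hne => by
    have hstep : secondChanceLoopA (c :: rest) s cnt
        = secondChanceLoopA rest (String.ofList [c]) 1 := by
      have := (hne c rest rfl)
      simp [secondChanceLoopA, show ¬ (cnt ≥ 6) by omega, Ne.symm this]
    rw [hstep, loopA_run rest c 1 le_rfl (by norm_num), loopB_cons]
    by_cases hbig : (6:Int) ≤ 1 + (runLen c rest : Int)
    · have hge : (runLen c rest : Int) + 1 ≥ 6 := by omega
      rw [if_pos (by omega : (6:Int) ≤ 1 + (runLen c rest : Int)), if_pos hge]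
      have : min ((runLen c rest : Int) + 1) 6 = 6 := by omega
      rw [this]
    · have hnotge : ¬ ((runLen c rest : Int) + 1 ≥ 6) := by omega
      rw [if_neg (by omega : ¬ (6:Int) ≤ 1 + (runLen c rest : Int)), if_neg hnotge]
      have hmin : min ((runLen c rest : Int) + 1) 6 = 1 + (runLen c rest : Int) := by omega
      rw [hmin]
      apply loopAB n
      · have h1 := runLen_le c rest
        simp only [List.length_cons] at hlen
        simp only [List.length_drop]
        omega
      · omega
      · intro d rest' hdrop heq
        rw [drop_runLen] at hdrop
        have hd : (d == c) = false := dropWhile_head_not (· == c) rest d rest' hdrop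
        have : d = c := (ofList_singleton_inj heq).symm
        simp [this] at hd

-- ===== VERDICT (by name: the statement is the Claim_ definition above) =====
theorem second_chance_spec : Claim_equal_second_chance := by
  intro data _
  unfold Spec_second_chance second_chance second_chance_alt
  apply loopAB data.toList.length data.toList le_rfl "" 0 (by norm_num)
  intro c rest _ h
  have := congrArg String.toList h
  simp at this
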